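-- pv_equiv track=rewrite | github.com/MinhPhan92/quanlybanhang | backend/routes/deps.py | has_role
-- ===== SOURCE A (Python) =====
-- from typing import Dict, Optional, List
--
-- def has_role(current_user: Dict, allowed_roles: List[str]) -> bool:
--     """
--     Check if current user has one of the allowed roles.
--     Handles role name variations (e.g., "Employee" vs "NhanVien", "Customer" vs "KhachHang").
--
--     Args:
--         current_user: User dict from JWT token
--         allowed_roles: List of allowed role names
--
--     Returns:
--         True if user's role matches any allowed role (considering variations)
--     """
--     user_role = current_user.get("role")
--     if not user_role:
--         return False
--
--     # Normalize role names for comparison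
--     role_mapping = {
--         "Employee": ["Employee", "NhanVien"],
--         "NhanVien": ["Employee", "NhanVien"],
--         "Customer": ["Customer", "KhachHang"],
--         "KhachHang": ["Customer", "KhachHang"],
--     }
--
--     # Get all variations of the user's role
--     user_role_variations = role_mapping.get(user_role, [user_role])
--
--     # Check if any allowed role matches any variation of user's role
--     for allowed_role in allowed_roles:
--         allowed_variations = role_mapping.get(allowed_role, [allowed_role])
--         if any(variation in user_role_variations for variation in allowed_variations):
--             return True
--
--     return False
-- ===== SOURCE B (Python) =====
-- def has_role(current_user, allowed_roles):
--     user_role = current_user.get("role")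
--     if not user_role:
--         return False
--     # Symmetric partner of each role in a two-element variation class.
--     partner = {"Employee": "NhanVien", "NhanVien": "Employee",
--                "Customer": "KhachHang", "KhachHang": "Customer"}
--     allowed = set(allowed_roles)
--     if user_role in allowed:
--         return True
--     p = partner.get(user_role)
--     return p is not None and p in allowed
-- ===== Notes on version B (the rewrite author's own statement) =====
-- stated objective: alternative
-- what changed: Instead of scanning allowed_roles and intersecting per-role variation lists, B builds a set of allowed roles once and decides with at most two membership lookups: the user's role itself, and its unique synonym partner from a symmetric partner map.
import Mathlib
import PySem

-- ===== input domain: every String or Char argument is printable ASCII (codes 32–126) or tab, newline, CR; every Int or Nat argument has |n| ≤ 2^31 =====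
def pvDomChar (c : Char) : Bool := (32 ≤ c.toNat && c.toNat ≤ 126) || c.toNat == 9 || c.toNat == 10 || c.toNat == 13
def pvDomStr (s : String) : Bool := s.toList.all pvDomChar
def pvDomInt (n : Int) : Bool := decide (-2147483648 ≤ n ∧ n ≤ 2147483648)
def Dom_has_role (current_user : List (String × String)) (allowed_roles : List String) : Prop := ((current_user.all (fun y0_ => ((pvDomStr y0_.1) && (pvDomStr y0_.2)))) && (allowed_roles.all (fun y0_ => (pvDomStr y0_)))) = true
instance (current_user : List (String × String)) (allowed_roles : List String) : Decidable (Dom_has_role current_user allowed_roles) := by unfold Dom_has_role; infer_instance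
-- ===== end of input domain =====

-- B replaces A's scan-with-intersection over allowed_roles by a set of the allowed roles
-- built once plus at most two membership lookups (the user's role and its synonym partner);
-- objective: alternative (equivalence proved on the return value).

-- ===== PORT A =====
-- A's literal role_mapping dict: role -> list of its variations
def roleMapping : PySem.Dict String (List String) :=
  PySem.Dict.ofList
    [ ("Employee", ["Employee", "NhanVien"])
    , ("NhanVien", ["Employee", "NhanVien"])
    , ("Customer", ["Customer", "KhachHang"])
    , ("KhachHang", ["Customer", "KhachHang"]) ]

-- A's for-loop over allowed_roles with early return
def hasRoleLoop (userVars : List String) : List String → Bool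
  | [] => false
  | allowed :: rest =>
      let allowedVars := roleMapping.getD allowed [allowed]
      if allowedVars.any (fun v => userVars.contains v) then true
      else hasRoleLoop userVars rest

def has_role (current_user : List (String × String)) (allowed_roles : List String) : Bool :=
  match (PySem.Dict.mk current_user).get? "role" with
  | none => false                 -- missing key: user_role is None, falsy
  | some userRole =>
      if userRole = "" then false -- empty string is falsy
      else
        let userVars := roleMapping.getD userRole [userRole]
        hasRoleLoop userVars allowed_roles

-- ===== PORT B =====
-- B's symmetric partner dict: role -> its unique synonym
def partnerMap : PySem.Dict String String :=
  PySem.Dict.ofList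
    [ ("Employee", "NhanVien"), ("NhanVien", "Employee")
    , ("Customer", "KhachHang"), ("KhachHang", "Customer") ]

def has_role_alt (current_user : List (String × String)) (allowed_roles : List String) : Bool :=
  match (PySem.Dict.mk current_user).get? "role" with
  | none => false
  | some userRole =>
      if userRole = "" then false
      else
        let allowed : PySem.Set String := PySem.Set.ofList allowed_roles
        if allowed.contains userRole then true
        else
          match partnerMap.get? userRole with
          | none => false
          | some p => allowed.contains p

-- ===== PRECONDITION & SPEC =====
def Spec_has_role (current_user : List (String × String)) (allowed_roles : List String) (out : Bool) : Prop := out = has_role_alt current_user allowed_roles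
instance (current_user : List (String × String)) (allowed_roles : List String) (out : Bool) : Decidable (Spec_has_role current_user allowed_roles out) := by unfold Spec_has_role; infer_instance

-- ===== CLAIM (what is proved, stated in full; the proofs are below) =====
def Claim_equal_has_role : Prop := ∀ (current_user : List (String × String)) (allowed_roles : List String), Dom_has_role current_user allowed_roles → Spec_has_role current_user allowed_roles (has_role current_user allowed_roles)

-- ===== LEMMAS AND PROOFS =====

-- A's variation lookup, written out by cases on the four mapped roles
lemma rm_get (u : String) : roleMapping.getD u [u] =
    (if "Employee" = u then ["Employee", "NhanVien"] else if "NhanVien" = u then ["Employee", "NhanVien"]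
     else if "Customer" = u then ["Customer", "KhachHang"] else if "KhachHang" = u then ["Customer", "KhachHang"]
     else [u]) := by
  have h : roleMapping = PySem.Dict.mk [ ("Employee", ["Employee", "NhanVien"])
    , ("NhanVien", ["Employee", "NhanVien"])
    , ("Customer", ["Customer", "KhachHang"])
    , ("KhachHang", ["Customer", "KhachHang"]) ] := by decide
  simp only [h, PySem.Dict.getD, PySem.Dict.get?_mk_cons]
  split_ifs <;> simp_all [PySem.Dict.get?, List.find?]

-- B's partner lookup, written out by cases on the four mapped roles
lemma pm_get (u : String) : partnerMap.get? u =
    (if "Employee" = u then some "NhanVien" else if "NhanVien" = u then some "Employee"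
     else if "Customer" = u then some "KhachHang" else if "KhachHang" = u then some "Customer"
     else none) := by
  have h : partnerMap = PySem.Dict.mk [ ("Employee", "NhanVien"), ("NhanVien", "Employee")
    , ("Customer", "KhachHang"), ("KhachHang", "Customer") ] := by decide
  simp only [h, PySem.Dict.get?_mk_cons]
  split_ifs <;> simp_all [PySem.Dict.get?, List.find?]

-- A's inner intersection test is true iff the allowed role equals the user's role or its partner
lemma inner_iff (u a : String) :
    ((roleMapping.getD a [a]).any (fun v => (roleMapping.getD u [u]).contains v))
      = (a == u || (partnerMap.get? u).any (fun p => a == p)) := by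
  rw [rm_get u, rm_get a, pm_get u]
  split_ifs <;> subst_vars <;>
    first | rfl | (simp_all [beq_eq_decide, Bool.or_comm])

-- A's early-return loop decides existence of a matching allowed role
lemma loop_eq_any (u : String) (l : List String) :
    hasRoleLoop (roleMapping.getD u [u]) l
      = l.any (fun a => a == u || (partnerMap.get? u).any (fun p => a == p)) := by
  induction l with
  | nil => rfl
  | cons a rest ih =>
      simp only [hasRoleLoop, List.any_cons, ← ih, inner_iff u a]
      by_cases h : (a == u || (partnerMap.get? u).any (fun p => a == p)) = true <;> simp [h]

-- that existence is B's two set-membership lookups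
lemma any_eq_lookups (u : String) (l : List String) :
    l.any (fun a => a == u || (partnerMap.get? u).any (fun p => a == p))
      = (if (PySem.Set.ofList l).contains u then true
         else match partnerMap.get? u with
              | none => false
              | some p => (PySem.Set.ofList l).contains p) := by
  have hc : ∀ x : String, (PySem.Set.ofList l).contains x = decide (x ∈ l) := by
    intro x
    by_cases h : x ∈ l
    · simp only [h, decide_true]
      rw [PySem.Set.contains_iff, PySem.Set.mem_ofList]; exact h
    · simp only [h, decide_false]
      rw [Bool.eq_false_iff, Ne, PySem.Set.contains_iff, PySem.Set.mem_ofList]; exact h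
  cases hp : partnerMap.get? u with
  | none =>
      simp only [Option.any_none, Bool.or_false, hc]
      by_cases h : u ∈ l
      · simp only [h, decide_true, if_true, List.any_eq_true, beq_iff_eq]
        exact ⟨u, h, rfl⟩
      · simp only [h, decide_false, Bool.false_eq_true, if_false, List.any_eq_false, beq_iff_eq]
        intro x hx hxu; exact h (hxu ▸ hx)
  | some p =>
      simp only [Option.any_some, hc]
      by_cases hu : u ∈ l
      · simp only [hu, decide_true, if_true, List.any_eq_true, Bool.or_eq_true, beq_iff_eq]
        exact ⟨u, hu, Or.inl rfl⟩
      · simp only [hu, decide_false, Bool.false_eq_true, if_false]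
        by_cases hpm : p ∈ l
        · simp only [hpm, decide_true, List.any_eq_true, Bool.or_eq_true, beq_iff_eq]
          exact ⟨p, hpm, Or.inr rfl⟩
        · simp only [hpm, decide_false, List.any_eq_false, Bool.or_eq_true, beq_iff_eq]
          intro x hx h
          cases h with
          | inl h => exact hu (h ▸ hx)
          | inr h => exact hpm (h ▸ hx)

-- ===== VERDICT (by name: the statement is the Claim_ definition above) =====
theorem has_role_spec : Claim_equal_has_role := by
  intro current_user allowed_roles _
  unfold Spec_has_role has_role has_role_alt
  cases (PySem.Dict.mk current_user).get? "role" with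
  | none => rfl
  | some userRole =>
      by_cases h : userRole = "" <;> simp [h, loop_eq_any, any_eq_lookups]
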